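-- pv_equiv track=rewrite | github.com/jerodg/code-challenges | python/leet_code/2416.py | calculate_common_prefix_lengths
-- ===== SOURCE A (Python) =====
-- def calculate_common_prefix_lengths(words: list[str], sorted_indices: list[int]) -> list[int]:
--     """Calculate the lengths of common prefixes between consecutive words in a sorted list.
--
--     This function iterates through a list of words sorted by their indices and calculates the length
--     of the common prefix between each pair of consecutive words. The results are stored in a list
--     where each element represents the length of the common prefix for the corresponding word.
--
--     Parameters:
--         words (list[str]): The list of words to process.
--         sorted_indices (list[int]): The list of indices representing the sorted order of words.
--
--     Returns:
--         list[int]: A list of integers representing the lengths of common prefixes between consecutive words.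
--
--     Example:
--         >>> words = ['apple', 'apricot', 'banana']
--         >>> sorted_indices = [0, 1, 2]
--         >>> calculate_common_prefix_lengths(words, sorted_indices)
--         [0, 2, 0]
--     """
--     # Initialize a list to store the common prefix lengths, starting with 0 for the first word
--     common_prefix_lengths = [0] * len(words)
--
--     # Iterate through the sorted list of words starting from the second word
--     for i in range(1, len(words)):
--         # Initialize the common length to 0 and determine the maximum possible length of the common prefix
--         common_length, max_length = (
--             0,
--             min(len(prev_word := words[sorted_indices[i - 1]]), len(curr_word := words[sorted_indices[i]])),
--         )
--
--         # Increment the common length while the characters of the current and previous words match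
--         while common_length < max_length and prev_word[common_length] == curr_word[common_length]:
--             common_length += 1
--
--         # Store the calculated common length for the current word
--         common_prefix_lengths[i] = common_length
--
--     return common_prefix_lengths
-- ===== SOURCE B (Python) =====
-- def _lcp(a: str, b: str) -> int:
--     """Longest common prefix length by binary search on slice equality."""
--     lo, hi = 0, min(len(a), len(b))
--     while lo < hi:
--         mid = (lo + hi + 1) // 2
--         if a[:mid] == b[:mid]:
--             lo = mid
--         else:
--             hi = mid - 1
--     return lo
--
--
-- def calculate_common_prefix_lengths(words: list[str], sorted_indices: list[int]) -> list[int]: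
--     return [0 if i == 0 else _lcp(words[sorted_indices[i - 1]], words[sorted_indices[i]])
--             for i in range(len(words))]
-- ===== Notes on version B (the rewrite author's own statement) =====
-- stated objective: alternative
-- what changed: B computes each pairwise common-prefix length by binary search on the prefix length with whole-slice equality tests instead of A's character-by-character while loop, and builds the result as one comprehension over range(len(words)) instead of A's preallocated list mutated in a for loop; Pre_ excludes inputs where A raises IndexError (sorted_indices shorter than words, or an entry out of range as an index into words).
import Mathlib
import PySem

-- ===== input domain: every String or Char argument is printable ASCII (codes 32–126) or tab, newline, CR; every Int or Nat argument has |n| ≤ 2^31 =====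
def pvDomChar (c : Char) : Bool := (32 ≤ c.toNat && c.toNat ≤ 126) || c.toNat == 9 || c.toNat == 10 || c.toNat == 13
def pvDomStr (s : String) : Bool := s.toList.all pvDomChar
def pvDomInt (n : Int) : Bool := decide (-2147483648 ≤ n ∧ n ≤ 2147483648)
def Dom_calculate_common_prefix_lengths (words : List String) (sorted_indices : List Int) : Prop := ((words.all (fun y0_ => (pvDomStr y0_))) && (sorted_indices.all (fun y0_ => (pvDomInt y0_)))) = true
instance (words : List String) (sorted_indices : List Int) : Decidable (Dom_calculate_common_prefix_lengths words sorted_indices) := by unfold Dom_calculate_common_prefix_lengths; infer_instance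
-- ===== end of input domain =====

-- B computes each pairwise common-prefix length by binary search on the prefix length
-- with whole-slice equality tests, built as one comprehension (objective: alternative).

-- ===== PORT A =====
-- the 'while common_length < max_length and prev_word[common_length] == curr_word[common_length]' loop
def pvAWhile (prev curr : List Char) (m cl : Nat) : Nat :=
  if h : cl < m ∧ prev[cl]? = curr[cl]? then pvAWhile prev curr m (cl + 1) else cl
termination_by m - cl
decreasing_by have := h.1; omega

-- body of the 'for i in range(1, len(words))' iteration: the value stored at position i
def pvAVal (words : List String) (sorted_indices : List Int) (i : Int) : Int :=
  let prev := (PySem.List.pyGetD words (PySem.List.pyGetD sorted_indices (i - 1) 0) "").toList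
  let curr := (PySem.List.pyGetD words (PySem.List.pyGetD sorted_indices i 0) "").toList
  Int.ofNat (pvAWhile prev curr (min prev.length curr.length) 0)

def calculate_common_prefix_lengths (words : List String) (sorted_indices : List Int) : List Int :=
  (PySem.List.pyRange 1 (words.length : Int) 1).foldl
    (fun acc i => PySem.List.pySetD acc i (pvAVal words sorted_indices i))
    (List.replicate words.length (0 : Int))

-- ===== PORT B =====
-- _lcp's binary search: 'while lo < hi: mid=(lo+hi+1)//2; if a[:mid]==b[:mid]: lo=mid else: hi=mid-1'.
-- lo, hi, mid stay nonnegative throughout, so Nat with Nat division is exact for Python's '//',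
-- and a[:mid] with 0 ≤ mid is exactly List.take mid on the character list.
def pvLcpBS (a b : List Char) (lo hi : Nat) : Nat :=
  if _h : lo < hi then
    let mid := (lo + hi + 1) / 2
    if a.take mid = b.take mid then pvLcpBS a b mid hi else pvLcpBS a b lo (mid - 1)
  else lo
termination_by hi - lo
decreasing_by all_goals omega

-- '_lcp(a, b)': lo, hi = 0, min(len(a), len(b)); binary search; return lo
def pvLcp (a b : List Char) : Int :=
  Int.ofNat (pvLcpBS a b 0 (min a.length b.length))

def calculate_common_prefix_lengths_alt (words : List String) (sorted_indices : List Int) : List Int :=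
  (PySem.List.pyRange 0 (words.length : Int) 1).map fun i =>
    if i = 0 then 0
    else pvLcp (PySem.List.pyGetD words (PySem.List.pyGetD sorted_indices (i - 1) 0) "").toList
               (PySem.List.pyGetD words (PySem.List.pyGetD sorted_indices i 0) "").toList

-- ===== PRECONDITION & SPEC =====
-- Pre_ excludes exactly the inputs where the Python A raises IndexError: sorted_indices shorter
-- than words (with at least 2 words), or one of its first len(words) entries out of range as an
-- index into words.
def Pre_calculate_common_prefix_lengths (words : List String) (sorted_indices : List Int) : Prop :=
  words.length ≤ 1 ∨
    (words.length ≤ sorted_indices.length ∧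
      ∀ j ∈ sorted_indices.take words.length, PySem.Raise.InRange words.length j)

instance (words : List String) (sorted_indices : List Int) : Decidable (Pre_calculate_common_prefix_lengths words sorted_indices) := by
  unfold Pre_calculate_common_prefix_lengths; infer_instance

def pvWitness_calculate_common_prefix_lengths : List String × List Int :=
  ([], [])

def Spec_calculate_common_prefix_lengths (words : List String) (sorted_indices : List Int) (out : List Int) : Prop := out = calculate_common_prefix_lengths_alt words sorted_indices
instance (words : List String) (sorted_indices : List Int) (out : List Int) : Decidable (Spec_calculate_common_prefix_lengths words sorted_indices out) := by unfold Spec_calculate_common_prefix_lengths; infer_instance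

-- ===== CLAIM (what is proved, stated in full; the proofs are below) =====
def Claim_equal_calculate_common_prefix_lengths : Prop := ∀ (words : List String) (sorted_indices : List Int), Dom_calculate_common_prefix_lengths words sorted_indices → Pre_calculate_common_prefix_lengths words sorted_indices → Spec_calculate_common_prefix_lengths words sorted_indices (calculate_common_prefix_lengths words sorted_indices)

-- ===== LEMMAS AND PROOFS =====

-- canonical count of leading equal pairs
def pvLcpZ : List (Char × Char) → Nat
  | [] => 0
  | (x, y) :: r => if x = y then pvLcpZ r + 1 else 0

theorem pvLcpZ_le (ps : List (Char × Char)) : pvLcpZ ps ≤ ps.length := by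
  induction ps with
  | nil => simp [pvLcpZ]
  | cons p r ih => obtain ⟨x, y⟩ := p; by_cases h : x = y <;> (simp [pvLcpZ, h]; try omega)


theorem pvAWhile_eq (prev curr : List Char) (cl : Nat)
    (hcl : cl ≤ (prev.zip curr).length) :
    pvAWhile prev curr (min prev.length curr.length) cl
      = cl + pvLcpZ ((prev.zip curr).drop cl) := by
  have hlen : (prev.zip curr).length = min prev.length curr.length := List.length_zip
  by_cases hlt : cl < min prev.length curr.length
  · have hz : cl < (prev.zip curr).length := by omega
    have hdrop : (prev.zip curr).drop cl = (prev.zip curr)[cl] :: (prev.zip curr).drop (cl + 1) :=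
      List.drop_eq_getElem_cons hz
    have hp : cl < prev.length := by omega
    have hc : cl < curr.length := by omega
    have hzip : (prev.zip curr)[cl] = (prev[cl], curr[cl]) := List.getElem_zip
    by_cases heq : prev[cl] = curr[cl]
    · rw [pvAWhile]
      have hcond : cl < min prev.length curr.length ∧ prev[cl]? = curr[cl]? := by
        refine ⟨hlt, ?_⟩
        rw [List.getElem?_eq_getElem hp, List.getElem?_eq_getElem hc, heq]
      rw [dif_pos hcond]
      rw [pvAWhile_eq prev curr (cl + 1) (by omega)]
      rw [hdrop, hzip]
      simp [pvLcpZ, heq]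
      omega
    · rw [pvAWhile]
      have hcond : ¬ (cl < min prev.length curr.length ∧ prev[cl]? = curr[cl]?) := by
        rintro ⟨-, h2⟩
        rw [List.getElem?_eq_getElem hp, List.getElem?_eq_getElem hc] at h2
        exact heq (Option.some.inj h2)
      rw [dif_neg hcond, hdrop, hzip]
      simp [pvLcpZ, heq]
  · have hcm : cl = min prev.length curr.length := by omega
    rw [pvAWhile, dif_neg (by omega)]
    have : (prev.zip curr).drop cl = [] := by
      apply List.drop_eq_nil_of_le; omega
    simp [this, pvLcpZ]
termination_by (prev.zip curr).length - cl

-- a prefix of length m (within both strings) is common iff m ≤ the leading-equal count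
theorem pv_take_eq_iff (a b : List Char) (m : Nat) (hm : m ≤ min a.length b.length) :
    a.take m = b.take m ↔ m ≤ pvLcpZ (a.zip b) := by
  induction a generalizing b m with
  | nil => simp at hm; simp [hm]
  | cons x a' ih =>
    cases b with
    | nil => simp at hm; simp [hm]
    | cons y b' =>
      cases m with
      | zero => simp [pvLcpZ]
      | succ m' =>
        simp only [List.take_succ_cons, List.cons.injEq, List.zip_cons_cons, pvLcpZ]
        by_cases hxy : x = y
        · rw [if_pos hxy]
          simp only [hxy, true_and]
          rw [ih b' m' (by simp at hm ⊢; omega)]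
          omega
        · simp [hxy]

-- the binary search lands exactly on the leading-equal count
theorem pvLcpBS_eq (a b : List Char) (lo hi : Nat)
    (h1 : lo ≤ pvLcpZ (a.zip b)) (h2 : pvLcpZ (a.zip b) ≤ hi)
    (h3 : hi ≤ min a.length b.length) :
    pvLcpBS a b lo hi = pvLcpZ (a.zip b) := by
  by_cases h : lo < hi
  · rw [pvLcpBS, dif_pos h]
    set mid := (lo + hi + 1) / 2 with hmid
    have hlo : lo < mid := by omega
    have hhi : mid ≤ hi := by omega
    have hmm : mid ≤ min a.length b.length := by omega
    by_cases ht : a.take mid = b.take mid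
    · rw [if_pos ht]
      exact pvLcpBS_eq a b mid hi ((pv_take_eq_iff a b mid hmm).mp ht) h2 h3
    · rw [if_neg ht]
      have : ¬ mid ≤ pvLcpZ (a.zip b) := fun hle => ht ((pv_take_eq_iff a b mid hmm).mpr hle)
      exact pvLcpBS_eq a b lo (mid - 1) h1 (by omega) (by omega)
  · rw [pvLcpBS, dif_neg h]; omega
  termination_by hi - lo

-- per pair: A's character scan equals B's binary search
theorem pvPair_eq (prev curr : List Char) :
    Int.ofNat (pvAWhile prev curr (min prev.length curr.length) 0) = pvLcp prev curr := by
  have hlen : (prev.zip curr).length = min prev.length curr.length := List.length_zip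
  have hA := pvAWhile_eq prev curr 0 (Nat.zero_le _)
  simp only [List.drop_zero, Nat.zero_add] at hA
  have hB := pvLcpBS_eq prev curr 0 (min prev.length curr.length) (Nat.zero_le _)
    (by rw [← hlen]; exact pvLcpZ_le _) (le_refl _)
  unfold pvLcp
  rw [hA, hB]

-- setting at the junction of a prefix and a suffix
theorem pv_set_append (xs ys : List Int) (y v : Int) :
    (xs ++ y :: ys).set xs.length v = xs ++ v :: ys := by
  induction xs with
  | nil => rfl
  | cons a t ih => simp [ih]

-- A's fold over range(1, n) fills positions 1..m of the replicate list with F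
theorem pv_fold_set (n : Nat) (F : Int → Int) (m : Nat) (hm : m ≤ n - 1) (hn : 1 ≤ n) :
    ((List.range m).map (fun (k : Nat) => (1 : Int) + (k : Int))).foldl
        (fun acc i => PySem.List.pySetD acc i (F i)) (List.replicate n (0 : Int))
      = (0 :: (List.range m).map (fun (j : Nat) => F (1 + (j : Int)))) ++ List.replicate (n - 1 - m) 0 := by
  induction m with
  | zero =>
    simp
    conv_lhs => rw [show n = (n - 1) + 1 by omega]
    simp [List.replicate_succ]
  | succ m ih =>
    rw [List.range_succ, List.map_append, List.foldl_append, ih (by omega)]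
    simp only [List.map_cons, List.map_nil, List.foldl_cons, List.foldl_nil]
    have hcast : (1 : Int) + (m : Int) = ((1 + m : Nat) : Int) := by push_cast; ring
    have hsuf : n - 1 - m = (n - 1 - (m + 1)) + 1 := by omega
    have hlen : (0 :: (List.range m).map (fun (j : Nat) => F (1 + (j : Int)))).length = 1 + m := by
      simp; omega
    rw [hcast, PySem.List.pySetD_natCast, hsuf, List.replicate_succ]
    generalize hv : F ((1 + m : Nat) : Int) = v
    rw [← hlen, pv_set_append, List.map_append]
    simp only [List.map_cons, List.map_nil]
    rw [hcast, hv]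
    simp

-- ===== VERDICT (by name: the statement is the Claim_ definition above) =====
theorem calculate_common_prefix_lengths_spec : Claim_equal_calculate_common_prefix_lengths := by
  intro words sorted_indices _ _
  unfold Spec_calculate_common_prefix_lengths
  unfold calculate_common_prefix_lengths calculate_common_prefix_lengths_alt
  rw [PySem.List.pyRange_one 1, PySem.List.pyRange_one 0]
  rcases Nat.eq_zero_or_pos words.length with h0 | hpos
  · simp [h0]
  · have ht1 : ((words.length : Int) - 1).toNat = words.length - 1 := by omega
    have ht0 : ((words.length : Int) - 0).toNat = words.length := by omega
    rw [ht1, ht0,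
      pv_fold_set words.length (fun i => pvAVal words sorted_indices i) (words.length - 1)
        (le_refl _) hpos]
    rw [Nat.sub_self]
    simp only [List.replicate_zero, List.append_nil]
    conv_rhs => rw [show words.length = (words.length - 1) + 1 by omega, List.range_succ_eq_map]
    simp only [List.map_cons, List.map_map]
    congr 1
    apply List.map_congr_left
    intro j hj
    simp only [Function.comp_apply]
    have hc : ((0 : Int) + ((j.succ : Nat) : Int)) = (j : Int) + 1 := by push_cast; omega
    rw [hc, if_neg (show ¬ ((j : Int) + 1 = 0) by omega)]
    have h2 : (1 : Int) + (j : Int) = (j : Int) + 1 := by ring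
    simp only [pvAVal, h2]
    exact pvPair_eq _ _
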